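-- pv_equiv track=rewrite | github.com/ab180/dbt-plan | src/dbt_plan/manifest.py | find_downstream_batch
-- ===== SOURCE A (Python) =====
-- from collections import deque
--
-- def find_downstream_batch(
--     node_ids: list[str],
--     child_map: dict[str, list[str]],
--     models_only: bool = True,
-- ) -> dict[str, list[str]]:
--     """Find downstream dependents for multiple nodes with memoization.
--
--     Caches per-node downstream sets so overlapping subtrees are only
--     traversed once. For 200 changed models in a 2000-node DAG, this
--     eliminates 50-80% of redundant BFS work.
--
--     Returns:
--         Dict mapping each node_id to its sorted list of downstream node_ids.
--     """
--     cache: dict[str, frozenset[str]] = {}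
--
--     def _downstream(nid: str) -> frozenset[str]:
--         if nid in cache:
--             return cache[nid]
--         visited = {nid}
--         queue: deque[str] = deque()
--         result: set[str] = set()
--
--         for child in child_map.get(nid) or []:
--             if child not in visited:
--                 visited.add(child)
--                 queue.append(child)
--
--         while queue:
--             current = queue.popleft()
--             if current in cache:
--                 # Reuse cached downstream for this subtree
--                 result.update(cache[current])
--                 visited.update(cache[current])
--                 if not models_only or current.startswith("model."):
--                     result.add(current)
--                 continue
--             if not models_only or current.startswith("model."):
--                 result.add(current)
--             for child in child_map.get(current) or []:
--                 if child not in visited: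
--                     visited.add(child)
--                     queue.append(child)
--
--         # Exclude the starting node itself from its own downstream set
--         result.discard(nid)
--         frozen = frozenset(result)
--         cache[nid] = frozen
--         return frozen
--
--     return {nid: sorted(_downstream(nid)) for nid in node_ids}
-- ===== SOURCE B (Python) =====
-- def find_downstream_batch(
--     node_ids: list[str],
--     child_map: dict[str, list[str]],
--     models_only: bool = True,
-- ) -> dict[str, list[str]]:
--     """Plain per-node DFS with an explicit stack: collect every node reachable
--     from nid, then drop nid itself, filter, and sort. No cache, no frozensets,
--     no filtering during the traversal."""
--     result = {}
--     for nid in node_ids: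
--         seen = set()
--         stack = list(child_map.get(nid) or [])
--         while stack:
--             cur = stack.pop()
--             if cur not in seen:
--                 seen.add(cur)
--                 stack.extend(child_map.get(cur) or [])
--         seen.discard(nid)
--         result[nid] = sorted(
--             x for x in seen if not models_only or x.startswith("model.")
--         )
--     return result
-- ===== Notes on version B (the rewrite author's own statement) =====
-- stated objective: simpler
-- what changed: Replaced the memoized BFS (deque + cross-query frozenset cache + in-loop filtering) by a plain per-node stack DFS that collects the raw reachable set and filters/sorts once at the end.
import Mathlib
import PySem

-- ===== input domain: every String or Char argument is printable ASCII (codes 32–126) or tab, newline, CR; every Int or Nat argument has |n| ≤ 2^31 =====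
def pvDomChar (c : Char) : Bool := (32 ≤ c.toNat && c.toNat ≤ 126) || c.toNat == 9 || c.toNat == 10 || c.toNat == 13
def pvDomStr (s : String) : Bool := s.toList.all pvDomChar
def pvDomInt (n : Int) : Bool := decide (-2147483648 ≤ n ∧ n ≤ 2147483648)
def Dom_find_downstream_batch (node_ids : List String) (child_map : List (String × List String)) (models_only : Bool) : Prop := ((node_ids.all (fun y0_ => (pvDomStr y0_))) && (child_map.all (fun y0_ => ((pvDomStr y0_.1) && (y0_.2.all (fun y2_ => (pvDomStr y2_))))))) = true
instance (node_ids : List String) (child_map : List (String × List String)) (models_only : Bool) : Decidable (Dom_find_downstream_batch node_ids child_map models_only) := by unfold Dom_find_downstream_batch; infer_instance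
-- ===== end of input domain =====

-- B replaces A's memoized BFS (deque + cross-query frozenset cache + in-loop filtering) by a plain
-- per-node stack DFS that collects the raw reachable set and filters/sorts once at the end (simpler).

-- ===== PORT A =====

-- `child_map.get(n) or []` : a missing key (None) and a stored empty list both yield [] — exact
def pvChildren (cm : List (String × List String)) (n : String) : List String :=
  (PySem.Dict.get? (PySem.Dict.mk cm) n).getD []

-- `not models_only or s.startswith("model.")`
def pvKeep (models_only : Bool) (s : String) : Bool :=
  !models_only || PySem.Str.startswith s "model."

-- every node ever enqueued/pushed comes from some children list; used only to size the loop fuel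
def pvUniv (cm : List (String × List String)) : List String := cm.flatMap Prod.snd

-- `if child not in visited: visited.add(child); queue.append(child)`
def pvEnqueue (vq : PySem.Set String × List String) (child : String) :
    PySem.Set String × List String :=
  if PySem.Set.contains vq.1 child then vq
  else (PySem.Set.add vq.1 child, vq.2 ++ [child])

-- A's `while queue:` loop; the fuel strictly dominates a decreasing measure, so it never runs out
def pvBfsLoop (cm : List (String × List String)) (mo : Bool)
    (cache : PySem.Dict String (PySem.Set String)) :
    Nat → List String → PySem.Set String → PySem.Set String → PySem.Set String
  | 0, _, _, result => result
  | _ + 1, [], _, result => result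
  | fuel + 1, current :: qs, visited, result =>
    match PySem.Dict.get? cache current with
    | some cached =>
      pvBfsLoop cm mo cache fuel qs (PySem.Set.update visited cached)
        (if pvKeep mo current
         then PySem.Set.add (PySem.Set.update result cached) current
         else PySem.Set.update result cached)
    | none =>
      pvBfsLoop cm mo cache fuel
        ((pvChildren cm current).foldl pvEnqueue (visited, qs)).2
        ((pvChildren cm current).foldl pvEnqueue (visited, qs)).1
        (if pvKeep mo current then PySem.Set.add result current else result)

-- `_downstream(nid)` : returns the frozen set together with the updated cache
def pvDownstream (cm : List (String × List String)) (mo : Bool)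
    (cache : PySem.Dict String (PySem.Set String)) (nid : String) :
    PySem.Set String × PySem.Dict String (PySem.Set String) :=
  match PySem.Dict.get? cache nid with
  | some f => (f, cache)
  | none =>
    let vq := (pvChildren cm nid).foldl pvEnqueue (PySem.Set.add PySem.Set.empty nid, [])
    let res := pvBfsLoop cm mo cache (2 * (pvUniv cm).length + 1) vq.2 vq.1 PySem.Set.empty
    let frozen := PySem.Set.discard res nid
    (frozen, PySem.Dict.insert cache nid frozen)

def find_downstream_batch (node_ids : List String) (child_map : List (String × List String))
    (models_only : Bool) : List (String × List String) :=
  (node_ids.foldl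
    (fun (acc : PySem.Dict String (List String) × PySem.Dict String (PySem.Set String)) nid =>
      (PySem.Dict.insert acc.1 nid
         (PySem.List.sorted (pvDownstream child_map models_only acc.2 nid).1 (fun x => x)),
       (pvDownstream child_map models_only acc.2 nid).2))
    (PySem.Dict.empty, PySem.Dict.empty)).1.items

-- ===== PORT B =====

-- Source B's `while stack:` loop; the Lean list is Source B's `stack` REVERSED (head = top of stack):
-- `stack.pop()` = head, `stack.extend(l)` = l.reverse ++ ·; the fuel dominates a decreasing measure
def pvDfsLoop (cm : List (String × List String)) :
    Nat → List String → PySem.Set String → PySem.Set String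
  | 0, _, seen => seen
  | _ + 1, [], seen => seen
  | fuel + 1, cur :: rest, seen =>
    if PySem.Set.contains seen cur then pvDfsLoop cm fuel rest seen
    else pvDfsLoop cm fuel ((pvChildren cm cur).reverse ++ rest) (PySem.Set.add seen cur)

def find_downstream_batch_alt (node_ids : List String) (child_map : List (String × List String))
    (models_only : Bool) : List (String × List String) :=
  (node_ids.foldl
    (fun (acc : PySem.Dict String (List String)) nid =>
      PySem.Dict.insert acc nid
        (PySem.List.sorted
          ((PySem.Set.discard
              (pvDfsLoop child_map
                (((pvUniv child_map).length + 1) * ((pvUniv child_map).length + 1))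
                (pvChildren child_map nid).reverse PySem.Set.empty)
              nid).filter (pvKeep models_only))
          (fun x => x)))
    PySem.Dict.empty).items

-- ===== PRECONDITION & SPEC =====
def Spec_find_downstream_batch (node_ids : List String) (child_map : List (String × List String)) (models_only : Bool) (out : List (String × List String)) : Prop := out = find_downstream_batch_alt node_ids child_map models_only
instance (node_ids : List String) (child_map : List (String × List String)) (models_only : Bool) (out : List (String × List String)) : Decidable (Spec_find_downstream_batch node_ids child_map models_only out) := by unfold Spec_find_downstream_batch; infer_instance

-- ===== CLAIM (what is proved, stated in full; the proofs are below) =====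
def Claim_equal_find_downstream_batch : Prop := ∀ (node_ids : List String) (child_map : List (String × List String)) (models_only : Bool), Dom_find_downstream_batch node_ids child_map models_only → Spec_find_downstream_batch node_ids child_map models_only (find_downstream_batch node_ids child_map models_only)

-- ===== LEMMAS AND PROOFS =====

-- x is reachable from root by at least one child_map edge
inductive pvReach (cm : List (String × List String)) (root : String) : String → Prop
  | base {c : String} : c ∈ pvChildren cm root → pvReach cm root c
  | step {b c : String} : pvReach cm root b → c ∈ pvChildren cm b → pvReach cm root c

theorem pvReach_trans {cm : List (String × List String)} {a b c : String}
    (hab : pvReach cm a b) (hbc : pvReach cm b c) : pvReach cm a c := by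
  induction hbc with
  | base h => exact .step hab h
  | step _ h ih => exact .step ih h

theorem pvChildren_mem_map (cm : List (String × List String)) (n : String) :
    pvChildren cm n = [] ∨ pvChildren cm n ∈ cm.map Prod.snd := by
  induction cm with
  | nil => left; rfl
  | cons p rest ih =>
    obtain ⟨k, v⟩ := p
    by_cases h : (k == n) = true
    · right
      simp [pvChildren, PySem.Dict.get?_mk_cons, h]
    · rcases ih with h' | h'
      · left
        simpa [pvChildren, PySem.Dict.get?_mk_cons, h] using h'
      · right
        simp only [List.map_cons, List.mem_cons]
        right
        simpa [pvChildren, PySem.Dict.get?_mk_cons, h] using h'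

theorem pvChildren_subset_univ {cm : List (String × List String)} {n c : String}
    (h : c ∈ pvChildren cm n) : c ∈ pvUniv cm := by
  rcases pvChildren_mem_map cm n with h' | h'
  · rw [h'] at h; cases h
  · obtain ⟨p, hp, hp2⟩ := List.mem_map.mp h'
    exact List.mem_flatMap.mpr ⟨p, hp, by rw [hp2]; exact h⟩

theorem pvChildren_length_le (cm : List (String × List String)) (n : String) :
    (pvChildren cm n).length ≤ (pvUniv cm).length := by
  rcases pvChildren_mem_map cm n with h' | h'
  · simp [h']
  · rw [pvUniv, List.length_flatMap]
    have : (pvChildren cm n).length ∈ cm.map (fun a => (Prod.snd a).length) := by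
      obtain ⟨p, hp, hp2⟩ := List.mem_map.mp h'
      exact List.mem_map.mpr ⟨p, hp, by rw [hp2]⟩
    calc (pvChildren cm n).length ≤ (cm.map (fun a => (Prod.snd a).length)).sum :=
          List.le_sum_of_mem this
      _ = (List.map (fun a => (Prod.snd a).length) cm).sum := rfl

-- number of universe entries not yet visited
def pvCount (cm : List (String × List String)) (V : PySem.Set String) : Nat :=
  ((pvUniv cm).filter (fun y => !(PySem.Set.contains V y))).length

theorem pv_filter_mono {U : List String} {p q : String → Bool}
    (h : ∀ y, q y = true → p y = true) : (U.filter q).length ≤ (U.filter p).length := by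
  have e : U.filter q = (U.filter p).filter q := by
    rw [List.filter_filter]
    apply List.filter_congr
    intro a _
    cases hq : q a
    · simp
    · simp [h a hq]
  rw [e]
  exact List.length_filter_le _ _

theorem pv_filter_strict {U : List String} {p q : String → Bool}
    (h : ∀ y, q y = true → p y = true) {c : String} (hcU : c ∈ U) (hpc : p c = true)
    (hqc : q c = false) : (U.filter q).length < (U.filter p).length := by
  have e : U.filter q = (U.filter p).filter q := by
    rw [List.filter_filter]
    apply List.filter_congr
    intro a _
    cases hq : q a
    · simp
    · simp [h a hq]
  rw [e]
  exact List.length_filter_lt_length_iff_exists.mpr ⟨c, List.mem_filter.mpr ⟨hcU, hpc⟩, by simp [hqc]⟩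

theorem pvCount_update_le (cm : List (String × List String)) (V : PySem.Set String)
    (f : List String) : pvCount cm (PySem.Set.update V f) ≤ pvCount cm V := by
  apply pv_filter_mono
  intro y hy
  simp only [Bool.not_eq_true'] at hy ⊢
  cases hc : PySem.Set.contains V y
  · rfl
  · exfalso
    have : y ∈ PySem.Set.update V f := (PySem.Set.mem_update _ _ _).mpr (Or.inl ((PySem.Set.contains_iff V y).mp hc))
    rw [(PySem.Set.contains_iff _ y).mpr this] at hy
    cases hy

theorem pvCount_add_lt {cm : List (String × List String)} {V : PySem.Set String} {c : String}
    (hcU : c ∈ pvUniv cm) (hcV : c ∉ V) :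
    pvCount cm (PySem.Set.add V c) < pvCount cm V := by
  apply pv_filter_strict (c := c) _ hcU
  · simp only [Bool.not_eq_true']
    cases hc : PySem.Set.contains V c
    · rfl
    · exact absurd ((PySem.Set.contains_iff V c).mp hc) hcV
  · have hct : PySem.Set.contains (PySem.Set.add V c) c = true :=
      (PySem.Set.contains_iff _ c).mpr ((PySem.Set.mem_add _ _ _).mpr (Or.inr rfl))
    simp [hct]
  · intro y hy
    simp only [Bool.not_eq_true'] at hy ⊢
    cases hc : PySem.Set.contains V y
    · rfl
    · exfalso
      have : y ∈ PySem.Set.add V c := (PySem.Set.mem_add _ _ _).mpr (Or.inl ((PySem.Set.contains_iff V y).mp hc))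
      rw [(PySem.Set.contains_iff _ y).mpr this] at hy
      cases hy

theorem pvEnqueue_fold (l : List String) :
    ∀ (V : PySem.Set String) (Q : List String), V.Nodup →
      (l.foldl pvEnqueue (V, Q)).1.Nodup ∧
      (∀ y, y ∈ (l.foldl pvEnqueue (V, Q)).1 ↔ y ∈ V ∨ y ∈ l) ∧
      (∀ y, y ∈ (l.foldl pvEnqueue (V, Q)).2 ↔ y ∈ Q ∨ (y ∈ l ∧ y ∉ V)) ∧
      (l.foldl pvEnqueue (V, Q)).2.length ≤ Q.length + l.length := by
  induction l with
  | nil => intro V Q hV; exact ⟨hV, by simp, by simp, by simp⟩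
  | cons c t ih =>
    intro V Q hV
    simp only [List.foldl_cons]
    by_cases hc : c ∈ V
    · have hcont : PySem.Set.contains V c = true := (PySem.Set.contains_iff V c).mpr hc
      have he : pvEnqueue (V, Q) c = (V, Q) := by
        simp [pvEnqueue, hcont]
        exact hc
      rw [he]
      obtain ⟨h1, h2, h3, h4⟩ := ih V Q hV
      refine ⟨h1, fun y => ?_, fun y => ?_, by simp only [List.length_cons]; omega⟩
      · rw [h2]
        constructor
        · rintro (h | h); exact Or.inl h; exact Or.inr (List.mem_cons_of_mem _ h)
        · rintro (h | h)
          · exact Or.inl h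
          · rcases List.mem_cons.mp h with rfl | h
            · exact Or.inl hc
            · exact Or.inr h
      · rw [h3]
        constructor
        · rintro (h | ⟨h, h'⟩); exact Or.inl h; exact Or.inr ⟨List.mem_cons_of_mem _ h, h'⟩
        · rintro (h | ⟨h, h'⟩)
          · exact Or.inl h
          · rcases List.mem_cons.mp h with rfl | h
            · exact absurd hc h'
            · exact Or.inr ⟨h, h'⟩
    · have he : pvEnqueue (V, Q) c = (PySem.Set.add V c, Q ++ [c]) := by
        have : PySem.Set.contains V c = false := by
          cases h : PySem.Set.contains V c
          · rfl
          · exact absurd ((PySem.Set.contains_iff V c).mp h) hc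
        simp [pvEnqueue, this]
        exact hc
      rw [he]
      obtain ⟨h1, h2, h3, h4⟩ := ih (PySem.Set.add V c) (Q ++ [c]) (PySem.Set.nodup_add V c hV)
      refine ⟨h1, fun y => ?_, fun y => ?_, by simp only [List.length_append, List.length_singleton, List.length_cons, List.length_nil] at h4 ⊢; omega⟩
      · rw [h2, PySem.Set.mem_add]
        constructor
        · rintro ((h | rfl) | h)
          · exact Or.inl h
          · exact Or.inr (List.mem_cons_self)
          · exact Or.inr (List.mem_cons_of_mem _ h)
        · rintro (h | h)
          · exact Or.inl (Or.inl h)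
          · rcases List.mem_cons.mp h with rfl | h
            · exact Or.inl (Or.inr rfl)
            · exact Or.inr h
      · rw [h3]
        simp only [List.mem_append, List.mem_singleton, PySem.Set.mem_add]
        constructor
        · rintro ((h | rfl) | ⟨h, h'⟩)
          · exact Or.inl h
          · exact Or.inr ⟨List.mem_cons_self, hc⟩
          · exact Or.inr ⟨List.mem_cons_of_mem _ h, fun hy => h' (Or.inl hy)⟩
        · rintro (h | ⟨h, h'⟩)
          · exact Or.inl (Or.inl h)
          · rcases List.mem_cons.mp h with rfl | h
            · exact Or.inl (Or.inr rfl)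
            · by_cases hyc : y = c
              · exact Or.inl (Or.inr hyc)
              · exact Or.inr ⟨h, fun hy => by rcases hy with hy | hy; exact h' hy; exact hyc hy⟩

theorem pvEnqueue_fold_measure {cm : List (String × List String)} (l : List String)
    (hl : ∀ c ∈ l, c ∈ pvUniv cm) :
    ∀ (V : PySem.Set String) (Q : List String),
      pvCount cm (l.foldl pvEnqueue (V, Q)).1 + (l.foldl pvEnqueue (V, Q)).2.length ≤
        pvCount cm V + Q.length := by
  induction l with
  | nil => intro V Q; simp
  | cons c t ih =>
    intro V Q
    simp only [List.foldl_cons]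
    have ht : ∀ x ∈ t, x ∈ pvUniv cm := fun x hx => hl x (List.mem_cons_of_mem _ hx)
    by_cases hc : c ∈ V
    · have hcont : PySem.Set.contains V c = true := (PySem.Set.contains_iff V c).mpr hc
      have he : pvEnqueue (V, Q) c = (V, Q) := by
        simp [pvEnqueue, hcont]
        exact hc
      rw [he]; exact ih ht V Q
    · have he : pvEnqueue (V, Q) c = (PySem.Set.add V c, Q ++ [c]) := by
        have : PySem.Set.contains V c = false := by
          cases h : PySem.Set.contains V c
          · rfl
          · exact absurd ((PySem.Set.contains_iff V c).mp h) hc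
        simp [pvEnqueue, this]
        exact hc
      rw [he]
      have h1 := ih ht (PySem.Set.add V c) (Q ++ [c])
      have h2 := pvCount_add_lt (cm := cm) (hl c List.mem_cons_self) hc
      simp only [List.length_append, List.length_singleton] at h1
      omega

-- the BFS loop invariant of A
def pvInv (cm : List (String × List String)) (mo : Bool) (nid : String)
    (V : PySem.Set String) (Q : List String) (Res : PySem.Set String) : Prop :=
  V.Nodup ∧ Res.Nodup ∧ nid ∈ V ∧
  (∀ q ∈ Q, q ∈ V ∧ q ≠ nid) ∧
  (∀ v ∈ V, v = nid ∨ pvReach cm nid v) ∧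
  (∀ x ∈ Res, pvReach cm nid x ∧ pvKeep mo x = true) ∧
  (∀ c ∈ pvChildren cm nid, c ∈ V) ∧
  (∀ v ∈ V, v = nid ∨ v ∈ Q ∨ (pvKeep mo v = true → v ∈ Res)) ∧
  (∀ v ∈ V, v ∈ Q ∨ (∀ c ∈ pvChildren cm v, c ∈ V) ∨
    (∀ x, pvReach cm v x → pvKeep mo x = true → x ∈ Res))

-- a cache entry for n is exactly n's filtered strict downstream set
def pvSetSpec (cm : List (String × List String)) (mo : Bool) (n : String)
    (f : PySem.Set String) : Prop :=
  f.Nodup ∧ ∀ x, x ∈ f ↔ (pvReach cm n x ∧ x ≠ n ∧ pvKeep mo x = true)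

def pvGoodCache (cm : List (String × List String)) (mo : Bool)
    (cache : PySem.Dict String (PySem.Set String)) : Prop :=
  ∀ n f, PySem.Dict.get? cache n = some f → pvSetSpec cm mo n f

def pvMeasure (cm : List (String × List String)) (V : PySem.Set String) (Q : List String) : Nat :=
  pvCount cm V + Q.length

theorem pvInv_complete {cm : List (String × List String)} {mo : Bool} {nid : String}
    {V Res : PySem.Set String} (h : pvInv cm mo nid V [] Res) :
    ∀ x, pvReach cm nid x → pvKeep mo x = true → x ≠ nid → x ∈ Res := by
  obtain ⟨-, -, -, -, -, -, hchn, hM, hCov⟩ := h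
  have key : ∀ x, pvReach cm nid x →
      (x ∈ V ∧ (x = nid ∨ (pvKeep mo x = true → x ∈ Res))) ∨
      (∀ y, (y = x ∨ pvReach cm x y) → pvKeep mo y = true → y ∈ Res) := by
    intro x hx
    induction hx with
    | base hc =>
      left
      refine ⟨hchn _ hc, ?_⟩
      rcases hM _ (hchn _ hc) with h | h | h
      · exact Or.inl h
      · cases h
      · exact Or.inr h
    | step hb hc ih =>
      rename_i b c
      rcases ih with ⟨hbV, -⟩ | hcov
      · rcases hCov b hbV with h | h | h
        · cases h
        · left
          refine ⟨h _ hc, ?_⟩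
          rcases hM _ (h _ hc) with h' | h' | h'
          · exact Or.inl h'
          · cases h'
          · exact Or.inr h'
        · right
          intro y hy hky
          apply h
          · rcases hy with rfl | hyy
            · exact .base hc
            · exact pvReach_trans (.base hc) hyy
          · exact hky
      · right
        intro y hy hky
        apply hcov y _ hky
        right
        rcases hy with rfl | hyy
        · exact .base hc
        · exact pvReach_trans (.base hc) hyy
  intro x hx hk hne
  rcases key x hx with ⟨-, h⟩ | h
  · rcases h with rfl | h
    · exact absurd rfl hne
    · exact h hk
  · exact h x (Or.inl rfl) hk

theorem pvInv_step_cache {cm : List (String × List String)} {mo : Bool} {nid current : String}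
    {qs : List String} {V Res f : PySem.Set String}
    (h : pvInv cm mo nid V (current :: qs) Res) (hf : pvSetSpec cm mo current f) :
    pvInv cm mo nid (PySem.Set.update V f) qs
      (if pvKeep mo current
       then PySem.Set.add (PySem.Set.update Res f) current
       else PySem.Set.update Res f) := by
  obtain ⟨hVnd, hRnd, hnidV, hQ, hVr, hRes, hchn, hM, hCov⟩ := h
  obtain ⟨hfnd, hfmem⟩ := hf
  obtain ⟨hcurV, hcurne⟩ := hQ current List.mem_cons_self
  have hcurReach : pvReach cm nid current := (hVr current hcurV).resolve_left hcurne
  have memV' : ∀ y, y ∈ PySem.Set.update V f ↔ y ∈ V ∨ y ∈ f := fun y => PySem.Set.mem_update V f y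
  have memR' : ∀ y, y ∈ (if pvKeep mo current
       then PySem.Set.add (PySem.Set.update Res f) current
       else PySem.Set.update Res f) ↔ (y ∈ Res ∨ y ∈ f ∨ (pvKeep mo current = true ∧ y = current)) := by
    intro y
    by_cases hk : pvKeep mo current = true
    · simp only [if_pos hk, PySem.Set.mem_add, PySem.Set.mem_update]
      tauto
    · simp only [if_neg hk, PySem.Set.mem_update]
      tauto
  have hReach_of_f : ∀ y ∈ f, pvReach cm nid y := fun y hy =>
    pvReach_trans hcurReach ((hfmem y).mp hy).1
  refine ⟨PySem.Set.nodup_update V f hVnd, ?_, (memV' nid).mpr (Or.inl hnidV), ?_, ?_, ?_, ?_, ?_, ?_⟩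
  · by_cases hk : pvKeep mo current = true
    · simp only [if_pos hk]
      exact PySem.Set.nodup_add _ current (PySem.Set.nodup_update Res f hRnd)
    · simp only [if_neg hk]
      exact PySem.Set.nodup_update Res f hRnd
  · intro q hq
    obtain ⟨h1, h2⟩ := hQ q (List.mem_cons_of_mem _ hq)
    exact ⟨(memV' q).mpr (Or.inl h1), h2⟩
  · intro v hv
    rcases (memV' v).mp hv with hv | hv
    · exact hVr v hv
    · exact Or.inr (hReach_of_f v hv)
  · intro x hx
    rcases (memR' x).mp hx with hx | hx | ⟨hk, rfl⟩
    · exact hRes x hx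
    · exact ⟨hReach_of_f x hx, ((hfmem x).mp hx).2.2⟩
    · exact ⟨hcurReach, hk⟩
  · intro c hc
    exact (memV' c).mpr (Or.inl (hchn c hc))
  · intro v hv
    rcases (memV' v).mp hv with hv | hv
    · rcases hM v hv with h | h | h
      · exact Or.inl h
      · rcases List.mem_cons.mp h with rfl | h
        · exact Or.inr (Or.inr fun hk => (memR' v).mpr (Or.inr (Or.inr ⟨hk, rfl⟩)))
        · exact Or.inr (Or.inl h)
      · exact Or.inr (Or.inr fun hk => (memR' v).mpr (Or.inl (h hk)))
    · exact Or.inr (Or.inr fun _ => (memR' v).mpr (Or.inr (Or.inl hv)))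
  · intro v hv
    have fullcov_of_reach_current : ∀ w, (w = current ∨ pvReach cm current w) →
        (∀ x, pvReach cm w x → pvKeep mo x = true → x ∈ (if pvKeep mo current
          then PySem.Set.add (PySem.Set.update Res f) current
          else PySem.Set.update Res f)) := by
      intro w hw x hx hkx
      have hcx : pvReach cm current x := by
        rcases hw with rfl | hw
        · exact hx
        · exact pvReach_trans hw hx
      by_cases hxc : x = current
      · subst hxc
        exact (memR' x).mpr (Or.inr (Or.inr ⟨hkx, rfl⟩))
      · exact (memR' x).mpr (Or.inr (Or.inl ((hfmem x).mpr ⟨hcx, hxc, hkx⟩)))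
    rcases (memV' v).mp hv with hv | hv
    · rcases hCov v hv with h | h | h
      · rcases List.mem_cons.mp h with rfl | h
        · exact Or.inr (Or.inr (fullcov_of_reach_current v (Or.inl rfl)))
        · exact Or.inl h
      · exact Or.inr (Or.inl fun c hc => (memV' c).mpr (Or.inl (h c hc)))
      · exact Or.inr (Or.inr fun x hx hk => (memR' x).mpr (Or.inl (h x hx hk)))
    · exact Or.inr (Or.inr (fullcov_of_reach_current v (Or.inr ((hfmem v).mp hv).1)))

theorem pvInv_step_scan {cm : List (String × List String)} {mo : Bool} {nid current : String}
    {qs : List String} {V Res : PySem.Set String}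
    (h : pvInv cm mo nid V (current :: qs) Res) :
    pvInv cm mo nid ((pvChildren cm current).foldl pvEnqueue (V, qs)).1
      ((pvChildren cm current).foldl pvEnqueue (V, qs)).2
      (if pvKeep mo current then PySem.Set.add Res current else Res) := by
  obtain ⟨hVnd, hRnd, hnidV, hQ, hVr, hRes, hchn, hM, hCov⟩ := h
  obtain ⟨hcurV, hcurne⟩ := hQ current List.mem_cons_self
  have hcurReach : pvReach cm nid current := (hVr current hcurV).resolve_left hcurne
  obtain ⟨hnd', memV', memQ', -⟩ := pvEnqueue_fold (pvChildren cm current) V qs hVnd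
  have memR' : ∀ y, y ∈ (if pvKeep mo current then PySem.Set.add Res current else Res) ↔
      (y ∈ Res ∨ (pvKeep mo current = true ∧ y = current)) := by
    intro y
    by_cases hk : pvKeep mo current = true
    · simp only [if_pos hk, PySem.Set.mem_add]; tauto
    · simp only [if_neg hk]; tauto
  refine ⟨hnd', ?_, (memV' nid).mpr (Or.inl hnidV), ?_, ?_, ?_, ?_, ?_, ?_⟩
  · by_cases hk : pvKeep mo current = true
    · simp only [if_pos hk]; exact PySem.Set.nodup_add _ current hRnd
    · simpa only [if_neg hk] using hRnd
  · intro q hq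
    rcases (memQ' q).mp hq with hq | ⟨hq1, hq2⟩
    · obtain ⟨h1, h2⟩ := hQ q (List.mem_cons_of_mem _ hq)
      exact ⟨(memV' q).mpr (Or.inl h1), h2⟩
    · exact ⟨(memV' q).mpr (Or.inr hq1), fun he => hq2 (he ▸ hnidV)⟩
  · intro v hv
    rcases (memV' v).mp hv with hv | hv
    · exact hVr v hv
    · exact Or.inr (.step hcurReach hv)
  · intro x hx
    rcases (memR' x).mp hx with hx | ⟨hk, rfl⟩
    · exact hRes x hx
    · exact ⟨hcurReach, hk⟩
  · intro c hc
    exact (memV' c).mpr (Or.inl (hchn c hc))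
  · intro v hv
    rcases (memV' v).mp hv with hv | hv
    · rcases hM v hv with h | h | h
      · exact Or.inl h
      · rcases List.mem_cons.mp h with rfl | h
        · exact Or.inr (Or.inr fun hk => (memR' v).mpr (Or.inr ⟨hk, rfl⟩))
        · exact Or.inr (Or.inl ((memQ' v).mpr (Or.inl h)))
      · exact Or.inr (Or.inr fun hk => (memR' v).mpr (Or.inl (h hk)))
    · by_cases hvV : v ∈ V
      · rcases hM v hvV with h | h | h
        · exact Or.inl h
        · rcases List.mem_cons.mp h with rfl | h
          · exact Or.inr (Or.inr fun hk => (memR' v).mpr (Or.inr ⟨hk, rfl⟩))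
          · exact Or.inr (Or.inl ((memQ' v).mpr (Or.inl h)))
        · exact Or.inr (Or.inr fun hk => (memR' v).mpr (Or.inl (h hk)))
      · exact Or.inr (Or.inl ((memQ' v).mpr (Or.inr ⟨hv, hvV⟩)))
  · intro v hv
    rcases (memV' v).mp hv with hv | hv
    · rcases hCov v hv with h | h | h
      · rcases List.mem_cons.mp h with rfl | h
        · exact Or.inr (Or.inl fun c hc => (memV' c).mpr (Or.inr hc))
        · exact Or.inl ((memQ' v).mpr (Or.inl h))
      · exact Or.inr (Or.inl fun c hc => (memV' c).mpr (Or.inl (h c hc)))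
      · exact Or.inr (Or.inr fun x hx hk => (memR' x).mpr (Or.inl (h x hx hk)))
    · by_cases hvV : v ∈ V
      · rcases hCov v hvV with h | h | h
        · rcases List.mem_cons.mp h with rfl | h
          · exact Or.inr (Or.inl fun c hc => (memV' c).mpr (Or.inr hc))
          · exact Or.inl ((memQ' v).mpr (Or.inl h))
        · exact Or.inr (Or.inl fun c hc => (memV' c).mpr (Or.inl (h c hc)))
        · exact Or.inr (Or.inr fun x hx hk => (memR' x).mpr (Or.inl (h x hx hk)))
      · exact Or.inl ((memQ' v).mpr (Or.inr ⟨hv, hvV⟩))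

theorem pvBfs_correct {cm : List (String × List String)} {mo : Bool}
    {cache : PySem.Dict String (PySem.Set String)} {nid : String}
    (hc : pvGoodCache cm mo cache) :
    ∀ (fuel : Nat) (Q : List String) (V Res : PySem.Set String),
      pvInv cm mo nid V Q Res → pvMeasure cm V Q ≤ fuel →
      (pvBfsLoop cm mo cache fuel Q V Res).Nodup ∧
      (∀ x ∈ pvBfsLoop cm mo cache fuel Q V Res, pvReach cm nid x ∧ pvKeep mo x = true) ∧
      (∀ x, pvReach cm nid x → pvKeep mo x = true → x ≠ nid →
        x ∈ pvBfsLoop cm mo cache fuel Q V Res) := by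
  intro fuel
  induction fuel with
  | zero =>
    intro Q V Res hinv hm
    have hQ : Q = [] := by
      cases Q with
      | nil => rfl
      | cons a t => exfalso; unfold pvMeasure at hm; simp at hm
    subst hQ
    simp only [pvBfsLoop]
    exact ⟨hinv.2.1, fun x hx => hinv.2.2.2.2.2.1 x hx, pvInv_complete hinv⟩
  | succ fuel ih =>
    intro Q V Res hinv hm
    cases Q with
    | nil =>
      simp only [pvBfsLoop]
      exact ⟨hinv.2.1, fun x hx => hinv.2.2.2.2.2.1 x hx, pvInv_complete hinv⟩
    | cons current qs =>
      cases hget : PySem.Dict.get? cache current with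
      | some f =>
        have hstep := pvInv_step_cache hinv (hc current f hget)
        have hm' : pvMeasure cm (PySem.Set.update V f) qs ≤ fuel := by
          have h1 := pvCount_update_le cm V f
          unfold pvMeasure at hm ⊢
          simp only [List.length_cons] at hm
          omega
        have := ih qs (PySem.Set.update V f) _ hstep hm'
        simpa only [pvBfsLoop, hget] using this
      | none =>
        have hstep := pvInv_step_scan hinv
        have hm' : pvMeasure cm ((pvChildren cm current).foldl pvEnqueue (V, qs)).1
            ((pvChildren cm current).foldl pvEnqueue (V, qs)).2 ≤ fuel := by
          have h1 := pvEnqueue_fold_measure (cm := cm) (pvChildren cm current)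
            (fun c hc => pvChildren_subset_univ hc) V qs
          unfold pvMeasure at hm ⊢
          simp only [List.length_cons] at hm
          omega
        have := ih _ _ _ hstep hm'
        simpa only [pvBfsLoop, hget] using this

theorem pvDownstream_spec {cm : List (String × List String)} {mo : Bool}
    {cache : PySem.Dict String (PySem.Set String)} (nid : String)
    (hc : pvGoodCache cm mo cache) :
    pvSetSpec cm mo nid (pvDownstream cm mo cache nid).1 ∧
      pvGoodCache cm mo (pvDownstream cm mo cache nid).2 := by
  cases hget : PySem.Dict.get? cache nid with
  | some f =>
    simp only [pvDownstream, hget]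
    exact ⟨hc nid f hget, hc⟩
  | none =>
    have hV0nd : (PySem.Set.add PySem.Set.empty nid).Nodup := by
      simp [PySem.Set.add, PySem.Set.empty, PySem.Set.contains]
    obtain ⟨hnd0, memV0, memQ0, hlen0⟩ :=
      pvEnqueue_fold (pvChildren cm nid) (PySem.Set.add PySem.Set.empty nid) [] hV0nd
    have memE : ∀ y : String, y ∈ PySem.Set.add PySem.Set.empty nid ↔ y = nid := by
      intro y
      rw [PySem.Set.mem_add]
      simp [PySem.Set.empty]
    have hnidV0 : nid ∈ ((pvChildren cm nid).foldl pvEnqueue (PySem.Set.add PySem.Set.empty nid, [])).1 :=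
      (memV0 nid).mpr (Or.inl ((memE nid).mpr rfl))
    have hinv : pvInv cm mo nid
        ((pvChildren cm nid).foldl pvEnqueue (PySem.Set.add PySem.Set.empty nid, [])).1
        ((pvChildren cm nid).foldl pvEnqueue (PySem.Set.add PySem.Set.empty nid, [])).2
        PySem.Set.empty := by
      refine ⟨hnd0, by simp [PySem.Set.empty], hnidV0, ?_, ?_, by simp [PySem.Set.empty], ?_, ?_, ?_⟩
      · intro q hq
        rcases (memQ0 q).mp hq with hq | ⟨hq1, hq2⟩
        · cases hq
        · exact ⟨(memV0 q).mpr (Or.inr hq1), fun he => hq2 ((memE q).mpr he)⟩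
      · intro v hv
        rcases (memV0 v).mp hv with hv | hv
        · exact Or.inl ((memE v).mp hv)
        · exact Or.inr (.base hv)
      · intro c hcm
        exact (memV0 c).mpr (Or.inr hcm)
      · intro v hv
        rcases (memV0 v).mp hv with hv | hv
        · exact Or.inl ((memE v).mp hv)
        · by_cases he : v = nid
          · exact Or.inl he
          · exact Or.inr (Or.inl ((memQ0 v).mpr (Or.inr ⟨hv, fun h => he ((memE v).mp h)⟩)))
      · intro v hv
        rcases (memV0 v).mp hv with hv | hv
        · have : v = nid := (memE v).mp hv
          subst this
          exact Or.inr (Or.inl fun c hcm => (memV0 c).mpr (Or.inr hcm))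
        · by_cases he : v = nid
          · subst he
            exact Or.inr (Or.inl fun c hcm => (memV0 c).mpr (Or.inr hcm))
          · exact Or.inl ((memQ0 v).mpr (Or.inr ⟨hv, fun h => he ((memE v).mp h)⟩))
    have hm : pvMeasure cm
        ((pvChildren cm nid).foldl pvEnqueue (PySem.Set.add PySem.Set.empty nid, [])).1
        ((pvChildren cm nid).foldl pvEnqueue (PySem.Set.add PySem.Set.empty nid, [])).2 ≤
        2 * (pvUniv cm).length + 1 := by
      have h1 : pvCount cm ((pvChildren cm nid).foldl pvEnqueue (PySem.Set.add PySem.Set.empty nid, [])).1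
          ≤ (pvUniv cm).length := List.length_filter_le _ _
      have h2 := pvChildren_length_le cm nid
      unfold pvMeasure
      simp only [List.length_nil, Nat.zero_add] at hlen0
      omega
    obtain ⟨hRnd, hsound, hcomp⟩ := pvBfs_correct hc (2 * (pvUniv cm).length + 1) _ _ _ hinv hm
    set res := pvBfsLoop cm mo cache (2 * (pvUniv cm).length + 1)
      ((pvChildren cm nid).foldl pvEnqueue (PySem.Set.add PySem.Set.empty nid, [])).2
      ((pvChildren cm nid).foldl pvEnqueue (PySem.Set.add PySem.Set.empty nid, [])).1
      PySem.Set.empty with hres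
    have hfrozen : pvSetSpec cm mo nid (PySem.Set.discard res nid) := by
      refine ⟨PySem.Set.nodup_discard res nid hRnd, fun x => ?_⟩
      rw [PySem.Set.mem_discard]
      constructor
      · rintro ⟨hx, hne⟩
        obtain ⟨h1, h2⟩ := hsound x hx
        exact ⟨h1, hne, h2⟩
      · rintro ⟨h1, hne, h2⟩
        exact ⟨hcomp x h1 h2 hne, hne⟩
    constructor
    · simpa only [pvDownstream, hget] using hfrozen
    · simp only [pvDownstream, hget]
      intro n f hf
      rw [PySem.Dict.get?_insert] at hf
      by_cases hn : n = nid
      · subst hn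
        simp only [if_pos rfl] at hf
        cases hf
        exact hfrozen
      · rw [if_neg hn] at hf
        exact hc n f hf

-- the DFS loop invariant of B
def pvDInv (cm : List (String × List String)) (nid : String)
    (S : PySem.Set String) (K : List String) : Prop :=
  S.Nodup ∧
  (∀ v ∈ S, pvReach cm nid v) ∧
  (∀ k ∈ K, pvReach cm nid k) ∧
  (∀ k ∈ K, k ∈ pvUniv cm) ∧
  (∀ c ∈ pvChildren cm nid, c ∈ S ∨ c ∈ K) ∧
  (∀ v ∈ S, ∀ c ∈ pvChildren cm v, c ∈ S ∨ c ∈ K)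

def pvDMeasure (cm : List (String × List String)) (S : PySem.Set String) (K : List String) : Nat :=
  pvCount cm S * ((pvUniv cm).length + 1) + K.length

theorem pvDInv_complete {cm : List (String × List String)} {nid : String}
    {S : PySem.Set String} (h : pvDInv cm nid S []) : ∀ x, x ∈ S ↔ pvReach cm nid x := by
  obtain ⟨-, hS, -, -, hbase, hclose⟩ := h
  intro x
  constructor
  · exact hS x
  · intro hx
    induction hx with
    | base hcm => exact (hbase _ hcm).resolve_right (by simp)
    | step hb hcm ih => exact (hclose _ ih _ hcm).resolve_right (by simp)

theorem pvDfs_correct {cm : List (String × List String)} {nid : String} :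
    ∀ (fuel : Nat) (K : List String) (S : PySem.Set String),
      pvDInv cm nid S K → pvDMeasure cm S K ≤ fuel →
      (pvDfsLoop cm fuel K S).Nodup ∧ (∀ x, x ∈ pvDfsLoop cm fuel K S ↔ pvReach cm nid x) := by
  intro fuel
  induction fuel with
  | zero =>
    intro K S hinv hm
    have hK : K = [] := by
      cases K with
      | nil => rfl
      | cons a t => exfalso; unfold pvDMeasure at hm; simp at hm
    subst hK
    simp only [pvDfsLoop]
    exact ⟨hinv.1, pvDInv_complete hinv⟩
  | succ fuel ih =>
    intro K S hinv hm
    cases K with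
    | nil =>
      simp only [pvDfsLoop]
      exact ⟨hinv.1, pvDInv_complete hinv⟩
    | cons cur rest =>
      obtain ⟨hSnd, hS, hK, hKU, hbase, hclose⟩ := hinv
      by_cases hcin : cur ∈ S
      · have hcont : PySem.Set.contains S cur = true := (PySem.Set.contains_iff S cur).mpr hcin
        have hinv' : pvDInv cm nid S rest := by
          refine ⟨hSnd, hS, fun k hk => hK k (List.mem_cons_of_mem _ hk),
            fun k hk => hKU k (List.mem_cons_of_mem _ hk), ?_, ?_⟩
          · intro c hcm
            rcases hbase c hcm with h | h
            · exact Or.inl h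
            · rcases List.mem_cons.mp h with rfl | h
              · exact Or.inl hcin
              · exact Or.inr h
          · intro v hv c hcm
            rcases hclose v hv c hcm with h | h
            · exact Or.inl h
            · rcases List.mem_cons.mp h with rfl | h
              · exact Or.inl hcin
              · exact Or.inr h
        have hm' : pvDMeasure cm S rest ≤ fuel := by
          unfold pvDMeasure at hm ⊢
          simp only [List.length_cons] at hm
          omega
        have := ih rest S hinv' hm'
        simpa only [pvDfsLoop, hcont, if_true] using this
      · have hcont : PySem.Set.contains S cur = false := by
          cases h : PySem.Set.contains S cur
          · rfl
          · exact absurd ((PySem.Set.contains_iff S cur).mp h) hcin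
        have hcurReach : pvReach cm nid cur := hK cur List.mem_cons_self
        have hinv' : pvDInv cm nid (PySem.Set.add S cur) ((pvChildren cm cur).reverse ++ rest) := by
          refine ⟨PySem.Set.nodup_add S cur hSnd, ?_, ?_, ?_, ?_, ?_⟩
          · intro v hv
            rcases (PySem.Set.mem_add _ _ _).mp hv with hv | rfl
            · exact hS v hv
            · exact hcurReach
          · intro k hk
            rcases List.mem_append.mp hk with hk | hk
            · exact .step hcurReach (List.mem_reverse.mp hk)
            · exact hK k (List.mem_cons_of_mem _ hk)
          · intro k hk
            rcases List.mem_append.mp hk with hk | hk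
            · exact pvChildren_subset_univ (List.mem_reverse.mp hk)
            · exact hKU k (List.mem_cons_of_mem _ hk)
          · intro c hcm
            rcases hbase c hcm with h | h
            · exact Or.inl ((PySem.Set.mem_add _ _ _).mpr (Or.inl h))
            · rcases List.mem_cons.mp h with rfl | h
              · exact Or.inl ((PySem.Set.mem_add _ _ _).mpr (Or.inr rfl))
              · exact Or.inr (List.mem_append.mpr (Or.inr h))
          · intro v hv c hcm
            rcases (PySem.Set.mem_add _ _ _).mp hv with hv | rfl
            · rcases hclose v hv c hcm with h | h
              · exact Or.inl ((PySem.Set.mem_add _ _ _).mpr (Or.inl h))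
              · rcases List.mem_cons.mp h with rfl | h
                · exact Or.inl ((PySem.Set.mem_add _ _ _).mpr (Or.inr rfl))
                · exact Or.inr (List.mem_append.mpr (Or.inr h))
            · exact Or.inr (List.mem_append.mpr (Or.inl (List.mem_reverse.mpr hcm)))
        have hm' : pvDMeasure cm (PySem.Set.add S cur) ((pvChildren cm cur).reverse ++ rest) ≤ fuel := by
          have h1 := pvCount_add_lt (cm := cm) (hKU cur List.mem_cons_self) hcin
          have h2 := pvChildren_length_le cm cur
          unfold pvDMeasure at hm ⊢
          simp only [List.length_cons] at hm
          simp only [List.length_append, List.length_reverse]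
          have h3 : (pvCount cm (PySem.Set.add S cur) + 1) * ((pvUniv cm).length + 1) ≤
              pvCount cm S * ((pvUniv cm).length + 1) := Nat.mul_le_mul_right _ (by omega)
          rw [Nat.add_mul, Nat.one_mul] at h3
          omega
        have := ih _ _ hinv' hm'
        simpa only [pvDfsLoop, hcont, if_false] using this

-- B's per-node list (before sorting) carries exactly the filtered strict downstream set
theorem pvAlt_spec (cm : List (String × List String)) (mo : Bool) (nid : String) :
    pvSetSpec cm mo nid
      ((PySem.Set.discard
          (pvDfsLoop cm (((pvUniv cm).length + 1) * ((pvUniv cm).length + 1))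
            (pvChildren cm nid).reverse PySem.Set.empty)
          nid).filter (pvKeep mo)) := by
  have hinv : pvDInv cm nid PySem.Set.empty (pvChildren cm nid).reverse := by
    refine ⟨by simp [PySem.Set.empty], by simp [PySem.Set.empty], ?_, ?_, ?_, by simp [PySem.Set.empty]⟩
    · intro k hk
      exact .base (List.mem_reverse.mp hk)
    · intro k hk
      exact pvChildren_subset_univ (List.mem_reverse.mp hk)
    · intro c hcm
      exact Or.inr (List.mem_reverse.mpr hcm)
  have hm : pvDMeasure cm PySem.Set.empty (pvChildren cm nid).reverse ≤
      ((pvUniv cm).length + 1) * ((pvUniv cm).length + 1) := by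
    have h1 : pvCount cm PySem.Set.empty ≤ (pvUniv cm).length := List.length_filter_le _ _
    have h2 := pvChildren_length_le cm nid
    unfold pvDMeasure
    simp only [List.length_reverse]
    have h3 : pvCount cm PySem.Set.empty * ((pvUniv cm).length + 1) ≤
        (pvUniv cm).length * ((pvUniv cm).length + 1) := Nat.mul_le_mul_right _ h1
    have h4 : ((pvUniv cm).length + 1) * ((pvUniv cm).length + 1) =
        (pvUniv cm).length * ((pvUniv cm).length + 1) + ((pvUniv cm).length + 1) := by ring
    omega
  obtain ⟨hnd, hmem⟩ := pvDfs_correct (nid := nid) _ _ _ hinv hm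
  constructor
  · exact List.Nodup.filter _ (PySem.Set.nodup_discard _ nid hnd)
  · intro x
    rw [List.mem_filter, PySem.Set.mem_discard, hmem]
    constructor
    · rintro ⟨⟨h1, h2⟩, h3⟩
      exact ⟨h1, h2, h3⟩
    · rintro ⟨h1, h2, h3⟩
      exact ⟨⟨h1, h2⟩, h3⟩

-- the two per-node sorted lists agree whenever both carry the same set
theorem pvSorted_eq {cm : List (String × List String)} {mo : Bool} {nid : String}
    {f g : PySem.Set String} (hf : pvSetSpec cm mo nid f) (hg : pvSetSpec cm mo nid g) :
    PySem.List.sorted f (fun x => x) = PySem.List.sorted g (fun x => x) := by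
  apply PySem.List.sorted_eq_sorted_of_perm _ _ _ (fun a b h => h)
  rw [List.perm_ext_iff_of_nodup hf.1 hg.1]
  intro a
  rw [hf.2 a, hg.2 a]

theorem pvFold_eq (cm : List (String × List String)) (mo : Bool) :
    ∀ (ids : List String) (d : PySem.Dict String (List String))
      (cache : PySem.Dict String (PySem.Set String)), pvGoodCache cm mo cache →
      (ids.foldl
        (fun (acc : PySem.Dict String (List String) × PySem.Dict String (PySem.Set String)) nid =>
          (PySem.Dict.insert acc.1 nid
             (PySem.List.sorted (pvDownstream cm mo acc.2 nid).1 (fun x => x)),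
           (pvDownstream cm mo acc.2 nid).2)) (d, cache)).1 =
      ids.foldl
        (fun (acc : PySem.Dict String (List String)) nid =>
          PySem.Dict.insert acc nid
            (PySem.List.sorted
              ((PySem.Set.discard
                  (pvDfsLoop cm (((pvUniv cm).length + 1) * ((pvUniv cm).length + 1))
                    (pvChildren cm nid).reverse PySem.Set.empty)
                  nid).filter (pvKeep mo))
              (fun x => x))) d := by
  intro ids
  induction ids with
  | nil => intro d cache hc; rfl
  | cons nid t ih =>
    intro d cache hc
    simp only [List.foldl_cons]
    obtain ⟨hspec, hcache'⟩ := pvDownstream_spec (cache := cache) nid hc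
    rw [pvSorted_eq hspec (pvAlt_spec cm mo nid)]
    exact ih _ _ hcache'

-- ===== VERDICT (by name: the statement is the Claim_ definition above) =====
theorem find_downstream_batch_spec : Claim_equal_find_downstream_batch := by
  intro node_ids child_map models_only _
  unfold Spec_find_downstream_batch find_downstream_batch find_downstream_batch_alt
  have h := pvFold_eq child_map models_only node_ids PySem.Dict.empty PySem.Dict.empty
    (by intro n f hf; simp [PySem.Dict.get?_empty] at hf)
  rw [h]
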